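-- pv_equiv track=rewrite | github.com/alphakys/algorithm | python_algorithm/heap_data_structure.py | h_pop
-- ===== SOURCE A (Python) =====
-- def swap_num(arr, idx1, idx2):
--     tmp = arr[idx1]
--     arr[idx1] = arr[idx2]
--     arr[idx2] = tmp
--
-- def h_pop(arr):
--     count = len(arr)
--     length = count
--     ans = []
--     for _ in range(count):
--
--         min_num = arr[0]
--         parent_idx = 0
--         left_child_idx = parent_idx * 2 + 1
--
--         arr[0] = arr[-1]
--
--         while length > left_child_idx:
--
--             if length - 1 == left_child_idx:
--                 if arr[parent_idx] > arr[left_child_idx]: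
--                     swap_num(arr, parent_idx, left_child_idx)
--                 break
--
--             if arr[left_child_idx] < arr[left_child_idx + 1]:
--                 min_val = arr[left_child_idx]
--                 child_idx = left_child_idx
--             else:
--                 min_val = arr[left_child_idx + 1]
--                 child_idx = left_child_idx + 1
--
--             if arr[parent_idx] > min_val:
--                 swap_num(arr, parent_idx, child_idx)
--                 parent_idx = child_idx
--                 left_child_idx = parent_idx * 2 + 1
--
--             else:
--                 break
--
--         del arr[-1]
--         length -= 1
--         ans.append(min_num)
--
--     return ans
-- ===== SOURCE B (Python) =====
-- # B: purely functional formulation of the same popping process — recursive sift on a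
-- # copied list, immutable heap value threaded through the loop. Return value only:
-- # A empties its argument in place, B leaves the caller's list unmodified.
-- def sift(h, p, n):
--     left = 2 * p + 1
--     if n <= left:
--         return h
--     if n - 1 == left:
--         if h[p] > h[left]:
--             h = h[:]
--             h[p], h[left] = h[left], h[p]
--         return h
--     c = left if h[left] < h[left + 1] else left + 1
--     if h[p] > h[c]:
--         h = h[:]
--         h[p], h[c] = h[c], h[p]
--         return sift(h, c, n)
--     return h
--
-- def h_pop(arr):
--     h = list(arr)
--     ans = []
--     while h:
--         ans.append(h[0])
--         h = sift([h[-1]] + h[1:], 0, len(h))[:-1]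
--     return ans
-- ===== Notes on version B (the rewrite author's own statement) =====
-- stated objective: alternative
-- what changed: B recasts A's in-place heap mutation as a purely functional computation: the inline while-loop sift becomes a recursive sift function on a copied list, and the extraction loop threads an immutable heap value instead of destructively updating (and emptying) the caller's list.
import Mathlib
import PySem

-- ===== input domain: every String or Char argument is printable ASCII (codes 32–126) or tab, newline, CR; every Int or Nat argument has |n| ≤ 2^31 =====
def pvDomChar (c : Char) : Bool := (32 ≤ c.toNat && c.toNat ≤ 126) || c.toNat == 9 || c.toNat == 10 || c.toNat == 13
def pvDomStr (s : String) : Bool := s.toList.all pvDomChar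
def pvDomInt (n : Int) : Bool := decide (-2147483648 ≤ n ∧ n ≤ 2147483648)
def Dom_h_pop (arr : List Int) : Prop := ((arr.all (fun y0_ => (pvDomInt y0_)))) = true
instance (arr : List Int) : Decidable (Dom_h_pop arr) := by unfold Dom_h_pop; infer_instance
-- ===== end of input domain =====

-- B re-derives the same popping process functionally (recursive sift on a copied list,
-- an immutable heap value threaded through the loop); equivalence is about the return
-- value: A empties its argument in place, B leaves the caller's list unmodified.

-- ===== PORT A =====
-- swap_num: tmp = arr[idx1]; arr[idx1] = arr[idx2]; arr[idx2] = tmp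
def swapNum (arr : List Int) (i j : Nat) : List Int :=
  let tmp := arr.getD i 0
  ((arr.set i (arr.getD j 0)).set j tmp)

-- the inner `while length > left_child_idx` loop, made total by a fuel parameter
-- (called with fuel = length, more iterations than the loop can perform, so the
-- fuel-exhausted branch is unreachable); all reads are in range, ported with getD
def hPopWhileF : Nat → List Int → Nat → Nat → List Int
  | 0, arr, _, _ => arr
  | fuel + 1, arr, length, p =>
    let l := 2 * p + 1
    if length > l then
      if length - 1 = l then
        if arr.getD p 0 > arr.getD l 0 then swapNum arr p l else arr
      else
        let mc := if arr.getD l 0 < arr.getD (l + 1) 0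
                  then (arr.getD l 0, l) else (arr.getD (l + 1) 0, l + 1)
        if arr.getD p 0 > mc.1 then hPopWhileF fuel (swapNum arr p mc.2) length mc.2
        else arr
    else arr

-- the outer `for _ in range(count)` loop; state = (arr, length, ans)
def hPopLoop : Nat → List Int → Nat → List Int → List Int
  | 0, _, _, ans => ans
  | n + 1, arr, length, ans =>
    let m := arr.getD 0 0
    let arr1 := arr.set 0 (arr.getD (arr.length - 1) 0)   -- arr[0] = arr[-1]
    let arr2 := hPopWhileF length arr1 length 0
    hPopLoop n arr2.dropLast (length - 1) (ans ++ [m])    -- del arr[-1]; length -= 1; append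

def h_pop (arr : List Int) : List Int :=
  hPopLoop arr.length arr arr.length []

-- ===== PORT B =====
-- Source B's recursive sift, made total by a fuel parameter (called with fuel = n, more
-- than the recursion depth, so the fuel-exhausted branch is unreachable)
def siftAltF : Nat → List Int → Nat → Nat → List Int
  | 0, h, _, _ => h
  | fuel + 1, h, p, n =>
    let left := 2 * p + 1
    if n ≤ left then h
    else if n - 1 = left then
      if h.getD p 0 > h.getD left 0 then
        (h.set p (h.getD left 0)).set left (h.getD p 0)
      else h
    else
      let c := if h.getD left 0 < h.getD (left + 1) 0 then left else left + 1
      if h.getD p 0 > h.getD c 0 then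
        siftAltF fuel ((h.set p (h.getD c 0)).set c (h.getD p 0)) c n
      else h

-- the `while h:` loop, fuelled by the initial length (h shrinks by one per iteration)
def hPopAltGo : Nat → List Int → List Int → List Int
  | 0, _, ans => ans
  | fuel + 1, h, ans =>
    match h with
    | [] => ans
    | x :: xs =>
      hPopAltGo fuel
        ((siftAltF (xs.length + 1) ((x :: xs).getD xs.length 0 :: xs) 0 (xs.length + 1)).dropLast)
        (ans ++ [x])

def h_pop_alt (arr : List Int) : List Int :=
  hPopAltGo arr.length arr []

-- ===== PRECONDITION & SPEC =====
def Spec_h_pop (arr : List Int) (out : List Int) : Prop := out = h_pop_alt arr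
instance (arr : List Int) (out : List Int) : Decidable (Spec_h_pop arr out) := by unfold Spec_h_pop; infer_instance

-- ===== CLAIM (what is proved, stated in full; the proofs are below) =====
def Claim_equal_h_pop : Prop := ∀ (arr : List Int), Dom_h_pop arr → Spec_h_pop arr (h_pop arr)

-- ===== LEMMAS AND PROOFS =====

theorem siftAltF_length (fuel : Nat) : ∀ (h : List Int) (p n : Nat),
    (siftAltF fuel h p n).length = h.length := by
  induction fuel with
  | zero => intro h p n; rfl
  | succ fuel ih =>
    intro h p n
    simp only [siftAltF]
    split_ifs <;> simp [ih]

-- the two sift formulations agree at every fuel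
theorem whileF_eq_siftAltF (fuel : Nat) : ∀ (arr : List Int) (length p : Nat),
    hPopWhileF fuel arr length p = siftAltF fuel arr p length := by
  induction fuel with
  | zero => intro arr length p; rfl
  | succ fuel ih =>
    intro arr length p
    simp only [hPopWhileF, siftAltF, swapNum, gt_iff_lt]
    rcases Nat.lt_or_ge (2 * p + 1) length with h1 | h1
    · rw [if_pos h1, if_neg (show ¬ length ≤ 2 * p + 1 by omega)]
      by_cases h2 : length - 1 = 2 * p + 1
      · rw [if_pos h2, if_pos h2]
      · rw [if_neg h2, if_neg h2]
        by_cases h3 : arr.getD (2 * p + 1) 0 < arr.getD (2 * p + 1 + 1) 0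
        · simp only [if_pos h3, ih]
        · simp only [if_neg h3, ih]
    · rw [if_neg (show ¬ 2 * p + 1 < length by omega),
          if_pos (show length ≤ 2 * p + 1 by omega)]

-- main loop correspondence under the invariant length = arr.length = fuel
theorem loop_eq (n : Nat) : ∀ (arr ans : List Int), arr.length = n →
    hPopLoop n arr n ans = hPopAltGo n arr ans := by
  induction n with
  | zero => intro arr ans h; rfl
  | succ n ih =>
    intro arr ans hlen
    cases arr with
    | nil => simp at hlen
    | cons x xs =>
      have hxs : xs.length = n := by simpa using hlen
      subst hxs
      rw [hPopLoop, hPopAltGo]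
      simp only [List.getD_cons_zero, List.length_cons, Nat.add_sub_cancel]
      have hset : (x :: xs).set 0 ((x :: xs).getD xs.length 0)
          = (x :: xs).getD xs.length 0 :: xs := rfl
      rw [hset, whileF_eq_siftAltF]
      apply ih
      rw [List.length_dropLast, siftAltF_length]
      simp

-- ===== VERDICT (by name: the statement is the Claim_ definition above) =====
theorem h_pop_spec : Claim_equal_h_pop := by
  intro arr _
  unfold Spec_h_pop h_pop h_pop_alt
  exact loop_eq arr.length arr [] rfl
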